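-- pv_equiv track=rewrite | github.com/01001100Trinh10/CECS427Assignments | Assignment 4/market_strategy.py | build_preference_set
-- ===== SOURCE A (Python) =====
-- def build_preference_set(sellers, buyers, prices, valuations):
--     pref_set = {}
--
--     for b in buyers:
--         max_profit = float('-inf')
--         best_sellers = []
--
--         for s in sellers:
--             profit = valuations[b][s] - prices[s]
--
--             # Sets preference based on the maximum profits
--             if profit > max_profit:
--                 max_profit = profit
--                 best_sellers = [s]
--             elif profit == max_profit:
--                 best_sellers.append(s)
--         pref_set[b] = best_sellers
--     return pref_set
-- ===== SOURCE B (Python) =====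
-- def build_preference_set(sellers, buyers, prices, valuations):
--     pref_set = {}
--     for b in buyers:
--         profits = [valuations[b][s] - prices[s] for s in sellers]
--         if profits:
--             m = max(profits)
--             pref_set[b] = [s for s, p in zip(sellers, profits) if p == m]
--         else:
--             pref_set[b] = []
--     return pref_set
-- ===== Notes on version B (the rewrite author's own statement) =====
-- stated objective: alternative
-- what changed: Replaces the running-max-with-reset accumulator loop over sellers by a two-pass decomposition: first compute the profit list and its maximum, then filter the sellers attaining it (ties keep seller order).
import Mathlib
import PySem

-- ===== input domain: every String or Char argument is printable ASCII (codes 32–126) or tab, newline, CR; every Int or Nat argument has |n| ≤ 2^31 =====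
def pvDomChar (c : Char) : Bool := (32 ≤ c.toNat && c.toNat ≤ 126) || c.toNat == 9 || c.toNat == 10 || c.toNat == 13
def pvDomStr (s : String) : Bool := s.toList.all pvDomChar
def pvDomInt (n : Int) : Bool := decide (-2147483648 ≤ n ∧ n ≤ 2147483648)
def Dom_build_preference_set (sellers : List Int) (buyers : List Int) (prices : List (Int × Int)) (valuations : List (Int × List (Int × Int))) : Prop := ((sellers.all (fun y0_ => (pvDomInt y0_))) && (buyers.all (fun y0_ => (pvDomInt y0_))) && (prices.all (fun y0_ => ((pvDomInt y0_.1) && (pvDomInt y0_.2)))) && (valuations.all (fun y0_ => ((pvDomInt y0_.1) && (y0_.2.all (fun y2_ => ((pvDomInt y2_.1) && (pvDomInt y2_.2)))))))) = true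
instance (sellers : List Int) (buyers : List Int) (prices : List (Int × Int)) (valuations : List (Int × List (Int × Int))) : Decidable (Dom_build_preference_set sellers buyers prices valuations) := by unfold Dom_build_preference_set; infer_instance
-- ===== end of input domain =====

-- B replaces A's running-max-with-reset inner loop by a two-pass decomposition
-- (profit list + max, then a filter preserving seller order); same cost, alternative structure.

-- ===== PORT A =====
def build_preference_set (sellers : List Int) (buyers : List Int) (prices : List (Int × Int)) (valuations : List (Int × List (Int × Int))) : List (Int × List Int) :=
  let pd : PySem.Dict Int Int := PySem.Dict.mk prices
  let vd : PySem.Dict Int (List (Int × Int)) := PySem.Dict.mk valuations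
  (buyers.foldl (fun (pref : PySem.Dict Int (List Int)) b =>
    let vb : PySem.Dict Int Int := PySem.Dict.mk (vd.getD b [])
    -- max_profit = float('-inf') is modelled as `none`; any integer profit exceeds it
    let res := sellers.foldl (fun (st : Option Int × List Int) s =>
      let profit := vb.getD s 0 - pd.getD s 0
      match st.1 with
      | none => (some profit, [s])
      | some m =>
        if m < profit then (some profit, [s])
        else if profit = m then (st.1, st.2 ++ [s])
        else st) ((none : Option Int), ([] : List Int))
    pref.insert b res.2) PySem.Dict.empty).items

-- ===== PORT B =====
def build_preference_set_alt (sellers : List Int) (buyers : List Int) (prices : List (Int × Int)) (valuations : List (Int × List (Int × Int))) : List (Int × List Int) :=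
  let pd : PySem.Dict Int Int := PySem.Dict.mk prices
  let vd : PySem.Dict Int (List (Int × Int)) := PySem.Dict.mk valuations
  (buyers.foldl (fun (pref : PySem.Dict Int (List Int)) b =>
    let profits := sellers.map (fun s => (PySem.Dict.mk (vd.getD b []) : PySem.Dict Int Int).getD s 0 - pd.getD s 0)
    let best := match PySem.List.max? profits (fun x => x) with
      | none => ([] : List Int)
      | some m => ((sellers.zip profits).filter (fun sp => sp.2 == m)).map (fun sp => sp.1)
    pref.insert b best) PySem.Dict.empty).items

-- ===== PRECONDITION & SPEC =====
-- Pre_ excludes exactly the inputs on which Python A raises KeyError: with a nonempty seller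
-- list, a buyer missing from `valuations`, or a seller missing from `prices` or from `valuations[b]`.
def Pre_build_preference_set (sellers : List Int) (buyers : List Int) (prices : List (Int × Int)) (valuations : List (Int × List (Int × Int))) : Prop :=
  sellers = [] ∨ ∀ b ∈ buyers, (PySem.Dict.mk valuations).contains b = true ∧
    ∀ s ∈ sellers, (PySem.Dict.mk prices).contains s = true ∧
      (PySem.Dict.mk ((PySem.Dict.mk valuations).getD b [])).contains s = true
instance (sellers : List Int) (buyers : List Int) (prices : List (Int × Int)) (valuations : List (Int × List (Int × Int))) : Decidable (Pre_build_preference_set sellers buyers prices valuations) := by unfold Pre_build_preference_set; infer_instance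

def pvWitness_build_preference_set : List Int × List Int × (List (Int × Int)) × (List (Int × List (Int × Int))) :=
  ([0, 1], [7], [(0, 1), (1, 2)], [(7, [(0, 5), (1, 4)])])

def Spec_build_preference_set (sellers : List Int) (buyers : List Int) (prices : List (Int × Int)) (valuations : List (Int × List (Int × Int))) (out : List (Int × List Int)) : Prop := out = build_preference_set_alt sellers buyers prices valuations
instance (sellers : List Int) (buyers : List Int) (prices : List (Int × Int)) (valuations : List (Int × List (Int × Int))) (out : List (Int × List Int)) : Decidable (Spec_build_preference_set sellers buyers prices valuations out) := by unfold Spec_build_preference_set; infer_instance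

-- ===== CLAIM (what is proved, stated in full; the proofs are below) =====
def Claim_equal_build_preference_set : Prop := ∀ (sellers : List Int) (buyers : List Int) (prices : List (Int × Int)) (valuations : List (Int × List (Int × Int))), Dom_build_preference_set sellers buyers prices valuations → Pre_build_preference_set sellers buyers prices valuations → Spec_build_preference_set sellers buyers prices valuations (build_preference_set sellers buyers prices valuations)

-- ===== LEMMAS AND PROOFS =====

-- max of (l ++ [a]) in terms of max of l
lemma pv_max_append_singleton (l : List Int) (a : Int) :
    PySem.List.max? (l ++ [a]) (fun x => x) =
      some (match PySem.List.max? l (fun x => x) with | none => a | some m => max m a) := by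
  cases l with
  | nil => rfl
  | cons x t =>
      simp [PySem.List.max?_id_cons, List.foldl_append]

-- filtering the zip of sellers with their profits by the second component
lemma pv_zip_filter_map (f : Int → Int) (m : Int) (xs : List Int) :
    ((xs.zip (xs.map f)).filter (fun sp => sp.2 == m)).map (fun sp => sp.1)
      = xs.filter (fun s => f s == m) := by
  induction xs with
  | nil => simp
  | cons x t ih =>
      by_cases h : f x = m <;> simp [h, ih]

-- A's running-max-with-reset loop computes B's max-then-filter decomposition
lemma pv_loopA_eq (f : Int → Int) (xs : List Int) :
    xs.foldl (fun (st : Option Int × List Int) s =>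
      let profit := f s
      match st.1 with
      | none => (some profit, [s])
      | some m =>
        if m < profit then (some profit, [s])
        else if profit = m then (st.1, st.2 ++ [s])
        else st) ((none : Option Int), ([] : List Int))
    = (match PySem.List.max? (xs.map f) (fun x => x) with
       | none => ((none : Option Int), ([] : List Int))
       | some m => (some m, xs.filter (fun s => f s == m))) := by
  induction xs using List.reverseRecOn with
  | nil => rfl
  | append_singleton l a ih =>
      rw [List.foldl_append, ih]
      rcases hmax : PySem.List.max? (l.map f) (fun x => x) with _ | m
      · have hl : l.map f = [] := (PySem.List.max?_eq_none_iff _ _).mp hmax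
        have hl' : l = [] := by cases l <;> simp_all
        subst hl'
        simp [PySem.List.max?_id_cons]
      · have hle : ∀ y ∈ l.map f, y ≤ m := by
          intro y hy
          simpa using PySem.List.max?_isMax hmax y hy
        have hmax' : PySem.List.max? ((l ++ [a]).map f) (fun x => x) = some (max m (f a)) := by
          rw [List.map_append]
          simpa [hmax] using pv_max_append_singleton (l.map f) (f a)
        simp only [hmax']
        by_cases hlt : m < f a
        · have hmx : max m (f a) = f a := by omega
          have hfilt : l.filter (fun s => f s == f a) = [] := by
            rw [List.filter_eq_nil_iff]
            intro s hs
            have := hle (f s) (List.mem_map_of_mem hs)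
            simp only [beq_iff_eq]
            omega
          simp [hlt, hmx, List.filter_append, hfilt]
        · by_cases heq : f a = m
          · have hmx : max m (f a) = m := by omega
            simp [heq, List.filter_append]
          · have hmx : max m (f a) = m := by
              rcases lt_or_ge (f a) m with h | h
              · omega
              · omega
            have : ¬ (f a == m) = true := by simpa using heq
            simp [hlt, heq, hmx, List.filter_append, this]

-- per-buyer equality of the two inner computations
lemma pv_inner_eq (pd vb : PySem.Dict Int Int) (sellers : List Int) :
    (sellers.foldl (fun (st : Option Int × List Int) s =>
      let profit := vb.getD s 0 - pd.getD s 0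
      match st.1 with
      | none => (some profit, [s])
      | some m =>
        if m < profit then (some profit, [s])
        else if profit = m then (st.1, st.2 ++ [s])
        else st) ((none : Option Int), ([] : List Int))).2
    = (match PySem.List.max? (sellers.map (fun s => vb.getD s 0 - pd.getD s 0)) (fun x => x) with
       | none => ([] : List Int)
       | some m => ((sellers.zip (sellers.map (fun s => vb.getD s 0 - pd.getD s 0))).filter (fun sp => sp.2 == m)).map (fun sp => sp.1)) := by
  rw [pv_loopA_eq (fun s => vb.getD s 0 - pd.getD s 0) sellers]
  rcases hmax : PySem.List.max? (sellers.map (fun s => vb.getD s 0 - pd.getD s 0)) (fun x => x) with _ | m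
  · rfl
  · simp [pv_zip_filter_map]

-- ===== VERDICT (by name: the statement is the Claim_ definition above) =====
theorem build_preference_set_spec : Claim_equal_build_preference_set := by
  intro sellers buyers prices valuations _dom _pre
  unfold Spec_build_preference_set build_preference_set build_preference_set_alt
  simp only [pv_inner_eq]
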